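-- pv_equiv track=rewrite | github.com/axm-protocols/axm-forge | packages/axm-ast/src/axm_ast/core/ranker.py | _build_reverse_graph
-- ===== SOURCE A (Python) =====
-- def _build_reverse_graph(
--     graph: dict[str, set[str]],
--     nodes: list[str],
-- ) -> tuple[dict[str, list[str]], dict[str, int]]:
--     """Build reverse graph (incoming edges) and out-degree counts."""
--     incoming: dict[str, list[str]] = {node: [] for node in nodes}
--     out_degree: dict[str, int] = dict.fromkeys(nodes, 0)
--
--     for source, targets in graph.items():
--         valid_targets = [t for t in targets if t in incoming]
--         out_degree[source] = len(valid_targets)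
--         for target in valid_targets:
--             incoming[target].append(source)
--
--     return incoming, out_degree
-- ===== SOURCE B (Python) =====
-- def _build_reverse_graph(
--     graph: dict[str, set[str]],
--     nodes: list[str],
-- ) -> tuple[dict[str, list[str]], dict[str, int]]:
--     """Build reverse graph (incoming edges) and out-degree counts.
--
--     Pull-based: each node gathers its own incoming sources by scanning the
--     edge list, instead of pushing appends while iterating the edges once.
--     """
--     incoming = {
--         node: [source for source, targets in graph.items() if node in targets]
--         for node in nodes
--     }
--     out_degree = dict.fromkeys(nodes, 0)
--     for source, targets in graph.items():
--         out_degree[source] = sum(1 for t in targets if t in incoming)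
--     return incoming, out_degree
-- ===== Notes on version B (the rewrite author's own statement) =====
-- stated objective: alternative
-- what changed: A builds incoming push-based in one pass over the edges, appending sources as it goes; B builds incoming pull-based (each node scans the whole edge list for sources pointing at it) and computes out-degrees in a separate counting pass.
import Mathlib
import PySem

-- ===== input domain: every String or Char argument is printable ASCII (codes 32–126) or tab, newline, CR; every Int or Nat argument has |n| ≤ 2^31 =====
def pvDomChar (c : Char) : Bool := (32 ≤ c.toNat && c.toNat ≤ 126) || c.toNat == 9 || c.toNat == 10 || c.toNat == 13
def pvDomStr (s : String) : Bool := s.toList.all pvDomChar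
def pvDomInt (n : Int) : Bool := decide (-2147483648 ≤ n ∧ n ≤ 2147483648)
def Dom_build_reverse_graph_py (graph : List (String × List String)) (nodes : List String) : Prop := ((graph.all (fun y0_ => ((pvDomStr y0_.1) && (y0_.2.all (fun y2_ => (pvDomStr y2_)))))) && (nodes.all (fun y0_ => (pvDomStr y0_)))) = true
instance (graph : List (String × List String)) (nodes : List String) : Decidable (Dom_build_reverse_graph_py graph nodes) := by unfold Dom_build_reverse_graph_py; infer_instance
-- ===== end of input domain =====

-- B replaces A's push-based single pass with a pull-based per-node scan of the edge list; return values proved equal.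

-- ===== PORT A =====
-- one iteration of A's `for source, targets in graph.items()` loop over the pair state (incoming, out_degree)
def pvStepA (st : PySem.Dict String (List String) × PySem.Dict String Int)
    (p : String × List String) : PySem.Dict String (List String) × PySem.Dict String Int :=
  let valid_targets := p.2.filter (fun t => st.1.contains t)
  let od := st.2.insert p.1 (valid_targets.length : Int)
  let inc := valid_targets.foldl (fun inc t => inc.modify t [] (· ++ [p.1])) st.1
  (inc, od)

def build_reverse_graph_py (graph : List (String × List String)) (nodes : List String) :
    (List (String × List String)) × (List (String × Int)) :=
  -- incoming = {node: [] for node in nodes}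
  let incoming : PySem.Dict String (List String) :=
    nodes.foldl (fun d n => d.insert n []) PySem.Dict.empty
  -- out_degree = dict.fromkeys(nodes, 0)
  let out_degree : PySem.Dict String Int :=
    nodes.foldl (fun d n => d.insert n 0) PySem.Dict.empty
  let st := graph.foldl pvStepA (incoming, out_degree)
  (st.1.items, st.2.items)

-- ===== PORT B =====
def build_reverse_graph_py_alt (graph : List (String × List String)) (nodes : List String) :
    (List (String × List String)) × (List (String × Int)) :=
  -- incoming = {node: [s for s, targets in graph.items() if node in targets] for node in nodes}
  let incoming : PySem.Dict String (List String) :=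
    nodes.foldl (fun d n => d.insert n ((graph.filter (fun p => p.2.contains n)).map (·.1)))
      PySem.Dict.empty
  -- out_degree = dict.fromkeys(nodes, 0)
  let out0 : PySem.Dict String Int :=
    nodes.foldl (fun d n => d.insert n 0) PySem.Dict.empty
  -- out_degree[source] = sum(1 for t in targets if t in incoming)  (a 0/1 sum is countP)
  let out_degree : PySem.Dict String Int :=
    graph.foldl (fun d p => d.insert p.1 ((p.2.countP (fun t => incoming.contains t) : Int))) out0
  (incoming.items, out_degree.items)

-- ===== PRECONDITION & SPEC =====
-- Pre_ states the encoding invariants of A's argument type dict[str, set[str]]: graph keys are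
-- pairwise distinct and every target list is duplicate-free; a list violating them encodes no
-- Python input (Python collapses the duplicates while building the dict/sets).
def Pre_build_reverse_graph_py (graph : List (String × List String)) (nodes : List String) : Prop :=
  (graph.map Prod.fst).Nodup ∧ ∀ p ∈ graph, p.2.Nodup
instance (graph : List (String × List String)) (nodes : List String) : Decidable (Pre_build_reverse_graph_py graph nodes) := by unfold Pre_build_reverse_graph_py; infer_instance
def pvWitness_build_reverse_graph_py : (List (String × List String)) × List String :=
  ([("a", ["b"]), ("c", ["a", "d"])], ["a", "b"])

def Spec_build_reverse_graph_py (graph : List (String × List String)) (nodes : List String) (out : (List (String × List String)) × (List (String × Int))) : Prop := out = build_reverse_graph_py_alt graph nodes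
instance (graph : List (String × List String)) (nodes : List String) (out : (List (String × List String)) × (List (String × Int))) : Decidable (Spec_build_reverse_graph_py graph nodes out) := by unfold Spec_build_reverse_graph_py; infer_instance

-- ===== CLAIM (what is proved, stated in full; the proofs are below) =====
def Claim_equal_build_reverse_graph_py : Prop := ∀ (graph : List (String × List String)) (nodes : List String), Dom_build_reverse_graph_py graph nodes → Pre_build_reverse_graph_py graph nodes → Spec_build_reverse_graph_py graph nodes (build_reverse_graph_py graph nodes)

-- ===== LEMMAS AND PROOFS =====

-- the incoming-component of one pvStepA step (proof-side helper)
def pvIncStep (inc : PySem.Dict String (List String)) (p : String × List String) :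
    PySem.Dict String (List String) :=
  (p.2.filter (fun t => inc.contains t)).foldl (fun i t => i.modify t [] (· ++ [p.1])) inc

-- inner append loop: `contains` is unchanged when every modified key is already present
theorem innContains (vt : List String) (inc : PySem.Dict String (List String)) (s : String)
    (h : ∀ t ∈ vt, inc.contains t = true) (x : String) :
    (vt.foldl (fun i t => i.modify t [] (· ++ [s])) inc).contains x = inc.contains x := by
  induction vt generalizing inc with
  | nil => rfl
  | cons t rest ih =>
    simp only [List.foldl_cons]
    rw [ih]
    · rw [PySem.Dict.contains_modify]
      by_cases hx : x = t
      · subst hx; simp [h x (by simp)]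
      · simp [hx]
    · intro t' ht'
      rw [PySem.Dict.contains_modify]
      simp [h t' (List.mem_cons_of_mem _ ht')]

-- inner append loop: the key list is unchanged when every modified key is already present
theorem innKeys (vt : List String) (inc : PySem.Dict String (List String)) (s : String)
    (h : ∀ t ∈ vt, inc.contains t = true) :
    (vt.foldl (fun i t => i.modify t [] (· ++ [s])) inc).keys = inc.keys := by
  induction vt generalizing inc with
  | nil => rfl
  | cons t rest ih =>
    simp only [List.foldl_cons]
    rw [ih]
    · rw [PySem.Dict.keys_modify, PySem.Dict.keys_insert_of_contains _ _ (h t (by simp))]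
    · intro t' ht'
      rw [PySem.Dict.contains_modify]
      simp [h t' (List.mem_cons_of_mem _ ht')]

-- inner append loop: each key in vt receives exactly one `s` (vt duplicate-free)
theorem innGetD (vt : List String) (inc : PySem.Dict String (List String)) (s : String)
    (hnd : vt.Nodup) (n : String) :
    (vt.foldl (fun i t => i.modify t [] (· ++ [s])) inc).getD n [] =
      inc.getD n [] ++ (if n ∈ vt then [s] else []) := by
  induction vt generalizing inc with
  | nil => simp
  | cons t rest ih =>
    simp only [List.foldl_cons]
    rw [ih _ hnd.of_cons]
    rw [PySem.Dict.getD_modify]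
    by_cases hn : n = t
    · subst hn
      have : n ∉ rest := (List.nodup_cons.mp hnd).1
      simp [this]
    · simp [hn, List.mem_cons]

theorem incStep_contains (inc : PySem.Dict String (List String)) (p : String × List String)
    (x : String) : (pvIncStep inc p).contains x = inc.contains x := by
  apply innContains
  intro t ht
  exact (List.of_mem_filter ht)

theorem incStep_keys (inc : PySem.Dict String (List String)) (p : String × List String) :
    (pvIncStep inc p).keys = inc.keys := by
  apply innKeys
  intro t ht
  exact (List.of_mem_filter ht)

-- A's single loop over the pair state splits into two independent folds
theorem pairSplit (g : List (String × List String))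
    (inc : PySem.Dict String (List String)) (od : PySem.Dict String Int) :
    g.foldl pvStepA (inc, od) =
      (g.foldl pvIncStep inc,
       g.foldl (fun od p => od.insert p.1 (((p.2.filter (fun t => inc.contains t)).length : Int))) od) := by
  induction g generalizing inc od with
  | nil => rfl
  | cons p rest ih =>
    simp only [List.foldl_cons]
    have h1 : pvStepA (inc, od) p =
        (pvIncStep inc p, od.insert p.1 (((p.2.filter (fun t => inc.contains t)).length : Int))) := rfl
    rw [h1, ih]
    have hf : (fun t => (pvIncStep inc p).contains t) = (fun t => inc.contains t) := by
      funext t; exact incStep_contains inc p t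
    simp only [hf]

theorem outGetD (g : List (String × List String)) (inc : PySem.Dict String (List String))
    (hts : ∀ p ∈ g, p.2.Nodup) (n : String) :
    (g.foldl pvIncStep inc).getD n [] =
      inc.getD n [] ++ ((g.filter (fun p => inc.contains n && p.2.contains n)).map (·.1)) := by
  induction g generalizing inc with
  | nil => simp
  | cons p rest ih =>
    rw [List.foldl_cons, ih _ (fun q hq => hts q (List.mem_cons_of_mem _ hq))]
    have hf : (fun q : String × List String => (pvIncStep inc p).contains n && q.2.contains n)
        = (fun q : String × List String => inc.contains n && q.2.contains n) := by
      funext q; rw [incStep_contains]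
    simp only [hf]
    have hstep : (pvIncStep inc p).getD n [] =
        inc.getD n [] ++ (if n ∈ p.2.filter (fun t => inc.contains t) then [p.1] else []) := by
      apply innGetD
      exact List.Nodup.filter _ (hts p (by simp))
    rw [hstep, List.filter_cons]
    by_cases hc : (inc.contains n && p.2.contains n) = true
    · have hmem : n ∈ p.2.filter (fun t => inc.contains t) := by
        rw [List.mem_filter]
        refine ⟨?_, (Bool.and_eq_true ..|>.mp hc).1⟩
        have := (Bool.and_eq_true ..|>.mp hc).2
        simpa using this
      obtain ⟨h1, h2⟩ := Bool.and_eq_true ..|>.mp hc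
      rw [if_pos hmem, if_pos hc]
      simp [List.append_assoc]
    · have hnmem : n ∉ p.2.filter (fun t => inc.contains t) := by
        rw [List.mem_filter]
        intro ⟨h1, h2⟩
        apply hc
        rw [Bool.and_eq_true]
        exact ⟨h2, by simpa using h1⟩
      rw [if_neg hnmem, if_neg hc]
      simp

theorem outKeys (g : List (String × List String)) (inc : PySem.Dict String (List String)) :
    (g.foldl pvIncStep inc).keys = inc.keys := by
  induction g generalizing inc with
  | nil => rfl
  | cons p rest ih => rw [List.foldl_cons, ih, incStep_keys]

-- getD after a fold of inserts whose values depend only on the key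
theorem initGetD {ν : Type} (l : List String) (v : String → ν) (d : PySem.Dict String ν)
    (n : String) (dflt : ν) :
    (l.foldl (fun d x => d.insert x (v x)) d).getD n dflt =
      if n ∈ l then v n else d.getD n dflt := by
  induction l generalizing d with
  | nil => simp
  | cons x rest ih =>
    rw [List.foldl_cons, ih]
    rw [PySem.Dict.getD_insert]
    by_cases hn : n ∈ rest
    · simp [hn, List.mem_cons]
    · by_cases hx : n = x <;> simp [hn, hx, List.mem_cons]

-- ===== VERDICT (by name: the statement is the Claim_ definition above) =====
theorem build_reverse_graph_py_spec : Claim_equal_build_reverse_graph_py := by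
  intro graph nodes _ hpre
  obtain ⟨-, hts⟩ := hpre
  unfold Spec_build_reverse_graph_py build_reverse_graph_py build_reverse_graph_py_alt
  dsimp only []
  rw [pairSplit]
  -- names for the three initial dicts
  set incA0 : PySem.Dict String (List String) :=
    nodes.foldl (fun d n => d.insert n []) PySem.Dict.empty with hA0
  set incB : PySem.Dict String (List String) :=
    nodes.foldl (fun d n => d.insert n ((graph.filter (fun p => p.2.contains n)).map (·.1)))
      PySem.Dict.empty with hB0
  have hkA0 : incA0.keys = PySem.Set.ofList nodes := by
    rw [hA0, PySem.Dict.keys_foldl_insert nodes (fun _ _ => ([] : List String)) PySem.Dict.empty]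
    rw [PySem.Dict.keys_empty, PySem.Set.update_nil_left]
  have hkB : incB.keys = PySem.Set.ofList nodes := by
    rw [hB0, PySem.Dict.keys_foldl_insert nodes
      (fun _ n => ((graph.filter (fun p => p.2.contains n)).map (·.1))) PySem.Dict.empty]
    rw [PySem.Dict.keys_empty, PySem.Set.update_nil_left]
  have hcAB : ∀ x, incA0.contains x = incB.contains x := by
    intro x
    rw [PySem.Dict.contains_eq_decide_mem_keys, PySem.Dict.contains_eq_decide_mem_keys, hkA0, hkB]
  have hndA0 : incA0.keys.Nodup := by
    rw [hA0]
    exact PySem.Dict.nodup_keys_foldl_insert nodes _ _ PySem.Dict.nodup_keys_empty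
  have hndB : incB.keys.Nodup := by
    rw [hB0]
    exact PySem.Dict.nodup_keys_foldl_insert nodes _ _ PySem.Dict.nodup_keys_empty
  refine Prod.ext ?_ ?_
  · -- incoming components
    dsimp only
    have hndAf : (graph.foldl pvIncStep incA0).keys.Nodup := by rw [outKeys]; exact hndA0
    rw [PySem.Dict.items_eq_map_keys _ hndAf ([] : List String),
        PySem.Dict.items_eq_map_keys _ hndB ([] : List String), outKeys, hkA0, hkB]
    apply List.map_congr_left
    intro k hk
    have hkn : k ∈ nodes := (PySem.Set.mem_ofList nodes k).mp hk
    have hck : incA0.contains k = true := by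
      rw [PySem.Dict.contains_eq_decide_mem_keys, hkA0]
      simpa using hk
    rw [outGetD graph incA0 hts k, hck]
    have hgA0 : incA0.getD k [] = [] := by
      rw [hA0, initGetD nodes (fun _ => ([] : List String)) PySem.Dict.empty k []]
      simp [hkn]
    rw [hgA0]
    have hgB : incB.getD k [] = (graph.filter (fun p => p.2.contains k)).map (·.1) := by
      rw [hB0, initGetD nodes (fun n => ((graph.filter (fun p => p.2.contains n)).map (·.1)))
        PySem.Dict.empty k []]
      simp [hkn]
    rw [hgB]
    simp
  · -- out_degree components
    dsimp only
    have hfun : (fun (od : PySem.Dict String Int) (p : String × List String) =>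
          od.insert p.1 (((p.2.filter (fun t => incA0.contains t)).length : Int)))
        = (fun (od : PySem.Dict String Int) (p : String × List String) =>
          od.insert p.1 ((p.2.countP (fun t => incB.contains t) : Int))) := by
      funext od p
      have : (fun t => incB.contains t) = (fun t => incA0.contains t) := by
        funext t; rw [hcAB]
      rw [this, List.countP_eq_length_filter]
    rw [hfun]
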